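-- pv_equiv track=rewrite | github.com/AseiSugiyama/TIL | python/AtCoder/Beginner Contest 096/C - Grid Repainting 2/main.py | isPaintableCanvasBySquare
-- ===== SOURCE A (Python) =====
-- def isSpace(canvas, i, j):
--     if i in range(len(canvas)):
--         if j in range(len(canvas[i])):
--             return True if canvas[i][j] == "." else False
--         else:
--             return True
--     else:
--         return True
--
-- def isPaintableCanvasBySquare(canvas):
--     H = len(canvas)
--     W = len(canvas[0])
--     for i, j in [(i, j) for i in range(H) for j in range(W)]:
--         if(isSpace(canvas, i, j - 1) and
--            isSpace(canvas, i, j + 1) and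
--            isSpace(canvas, i - 1, j) and
--            isSpace(canvas, i + 1, j) and
--            not isSpace(canvas, i, j)):
--             return "No"
--     return "Yes"
-- ===== SOURCE B (Python) =====
-- def isPaintableCanvasBySquare(canvas):
--     black = {(i, j)
--              for i, row in enumerate(canvas)
--              for j, ch in enumerate(row)
--              if ch != '.'}
--     supported = {(i + di, j + dj)
--                  for i, j in black
--                  for di, dj in ((0, -1), (0, 1), (-1, 0), (1, 0))}
--     lonely = black - supported
--     if not lonely:
--         return "Yes"
--     cells = {(i, j)
--              for i in range(len(canvas))
--              for j in range(len(canvas[0]))}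
--     return "No" if lonely & cells else "Yes"
-- ===== Notes on version B (the rewrite author's own statement) =====
-- stated objective: alternative
-- what changed: Replaces the full-grid scan that probes each cell's four neighbors through the bounds-checking isSpace helper by set algebra: build the candidate-cell set, the black-cell set and its one-step dilation in the four directions, and answer No iff (black - dilation) & cells is nonempty.
-- crash fix: On the empty canvas A raises IndexError at canvas[0]; B returns 'Yes'. — e.g. on isPaintableCanvasBySquare([]): A raises IndexError, B returns "Yes"
import Mathlib
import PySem

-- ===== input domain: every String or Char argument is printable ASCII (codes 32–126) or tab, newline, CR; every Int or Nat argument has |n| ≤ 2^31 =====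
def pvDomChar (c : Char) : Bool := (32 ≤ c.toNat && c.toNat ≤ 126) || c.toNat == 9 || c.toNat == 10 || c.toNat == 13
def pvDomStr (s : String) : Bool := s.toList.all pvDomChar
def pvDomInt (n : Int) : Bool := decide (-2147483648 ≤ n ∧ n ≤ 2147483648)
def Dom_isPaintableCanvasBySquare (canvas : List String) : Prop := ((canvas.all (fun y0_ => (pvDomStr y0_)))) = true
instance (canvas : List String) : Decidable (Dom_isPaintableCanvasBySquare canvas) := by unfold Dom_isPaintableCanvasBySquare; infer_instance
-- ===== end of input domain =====

-- B answers by set algebra (black minus its one-step dilation) instead of probing each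
-- cell's four neighbors with a bounds-checking helper (objective: alternative).

-- ===== PORT A =====
-- isSpace(canvas, i, j): out-of-range indices count as space; in range, space iff '.'
def isSpaceA (canvas : List String) (i j : Int) : Bool :=
  if 0 ≤ i ∧ i < (canvas.length : Int) then
    let row := ((PySem.List.pyGet? canvas i).getD "").toList
    if 0 ≤ j ∧ j < (row.length : Int) then
      (PySem.List.pyGet? row j).getD ' ' == '.'
    else true
  else true

def isPaintableCanvasBySquare (canvas : List String) : String :=
  let H := canvas.length
  let W := ((PySem.List.pyGet? canvas 0).getD "").toList.length
  -- [(i, j) for i in range(H) for j in range(W)], early return "No" on first hit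
  let pairs := (List.range H).flatMap (fun i => (List.range W).map (fun j => (i, j)))
  if pairs.any (fun p =>
      isSpaceA canvas (p.1 : Int) ((p.2 : Int) - 1) &&
      isSpaceA canvas (p.1 : Int) ((p.2 : Int) + 1) &&
      isSpaceA canvas ((p.1 : Int) - 1) (p.2 : Int) &&
      isSpaceA canvas ((p.1 : Int) + 1) (p.2 : Int) &&
      !isSpaceA canvas (p.1 : Int) (p.2 : Int))
  then "No" else "Yes"

-- ===== PORT B =====
-- {(i, j) for i, row in enumerate(canvas) for j, ch in enumerate(row) if ch != '.'}
def blackOf (canvas : List String) : PySem.Set (Int × Int) :=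
  PySem.Set.ofList ((PySem.List.enumerate canvas).flatMap (fun p =>
    (PySem.List.enumerate p.2.toList).filterMap (fun q =>
      if q.2 ≠ '.' then some (p.1, q.1) else none)))

-- {(i + di, j + dj) for i, j in black for di, dj in ((0,-1),(0,1),(-1,0),(1,0))}
def supportedOf (black : PySem.Set (Int × Int)) : PySem.Set (Int × Int) :=
  PySem.Set.ofList (black.flatMap (fun p =>
    [(p.1, p.2 - 1), (p.1, p.2 + 1), (p.1 - 1, p.2), (p.1 + 1, p.2)]))

-- {(i, j) for i in range(len(canvas)) for j in range(len(canvas[0]))}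
def cellsOf (canvas : List String) : PySem.Set (Int × Int) :=
  PySem.Set.ofList ((List.range canvas.length).flatMap (fun (i : Nat) =>
    (List.range (((PySem.List.pyGet? canvas 0).getD "").toList.length)).map
      (fun (j : Nat) => ((i : Int), (j : Int)))))

def isPaintableCanvasBySquare_alt (canvas : List String) : String :=
  let black := blackOf canvas
  let supported := supportedOf black
  let lonely := PySem.Set.diff black supported
  if lonely.isEmpty then "Yes"
  else if !(PySem.Set.inter lonely (cellsOf canvas)).isEmpty then "No" else "Yes"

-- ===== PRECONDITION & SPEC =====
-- Pre_ excludes only the empty canvas, on which Python A raises IndexError at canvas[0].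
def Pre_isPaintableCanvasBySquare (canvas : List String) : Prop := canvas ≠ []
instance (canvas : List String) : Decidable (Pre_isPaintableCanvasBySquare canvas) := by
  unfold Pre_isPaintableCanvasBySquare; infer_instance
def pvWitness_isPaintableCanvasBySquare : List String := ["#.#", ".#."]

-- On the empty canvas A raises IndexError at canvas[0]; B returns "Yes".
def Raises_isPaintableCanvasBySquare (canvas : List String) : Prop := canvas = []
instance (canvas : List String) : Decidable (Raises_isPaintableCanvasBySquare canvas) := by
  unfold Raises_isPaintableCanvasBySquare; infer_instance
def pvRaiseWitness_isPaintableCanvasBySquare : List String := []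
def pvRaiseWitnessOut_isPaintableCanvasBySquare : String := "Yes"

def Spec_isPaintableCanvasBySquare (canvas : List String) (out : String) : Prop := out = isPaintableCanvasBySquare_alt canvas
instance (canvas : List String) (out : String) : Decidable (Spec_isPaintableCanvasBySquare canvas out) := by unfold Spec_isPaintableCanvasBySquare; infer_instance

-- ===== CLAIM (what is proved, stated in full; the proofs are below) =====
def Claim_equal_isPaintableCanvasBySquare : Prop := ∀ (canvas : List String), Dom_isPaintableCanvasBySquare canvas → Pre_isPaintableCanvasBySquare canvas → Spec_isPaintableCanvasBySquare canvas (isPaintableCanvasBySquare canvas)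
def Claim_raises_isPaintableCanvasBySquare : Prop := (∀ (canvas : List String), Dom_isPaintableCanvasBySquare canvas → Raises_isPaintableCanvasBySquare canvas → ¬ Pre_isPaintableCanvasBySquare canvas) ∧ (Dom_isPaintableCanvasBySquare (pvRaiseWitness_isPaintableCanvasBySquare) ∧ Raises_isPaintableCanvasBySquare (pvRaiseWitness_isPaintableCanvasBySquare) ∧ isPaintableCanvasBySquare_alt (pvRaiseWitness_isPaintableCanvasBySquare) = pvRaiseWitnessOut_isPaintableCanvasBySquare)

-- ===== LEMMAS AND PROOFS =====

-- membership in B's black set ↔ A's isSpace is false (in bounds and not '.')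
theorem mem_black_iff (canvas : List String) (i j : Int) :
    ((i, j) ∈ blackOf canvas) ↔ isSpaceA canvas i j = false := by
  unfold blackOf isSpaceA
  simp [PySem.Set.mem_ofList, List.mem_flatMap, PySem.List.mem_enumerate_iff, List.mem_filterMap]
  constructor
  · rintro ⟨k, hk, m, ⟨hm, hc⟩, rfl, rfl⟩
    have h1 : PySem.List.pyGet? canvas (k : Int) = some canvas[k] := by
      simp [hk]
    refine ⟨⟨by positivity, by exact_mod_cast hk⟩, ?_⟩
    rw [h1]
    simp only [Option.getD_some]
    refine ⟨⟨by positivity, by exact_mod_cast hm⟩, ?_⟩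
    have h2 : PySem.List.pyGet? canvas[k].toList (m : Int) = some canvas[k].toList[m] := by
      simp
    rw [h2]; simpa using hc
  · rintro ⟨⟨hi0, hi⟩, hrest⟩
    lift i to ℕ using hi0 with k
    have hk : k < canvas.length := by exact_mod_cast hi
    have h1 : PySem.List.pyGet? canvas (k : Int) = some canvas[k] := by
      simp [hk]
    rw [h1] at hrest
    simp only [Option.getD_some] at hrest
    obtain ⟨⟨hj0, hj⟩, hc⟩ := hrest
    lift j to ℕ using hj0 with m
    have hm : m < canvas[k].length := by exact_mod_cast hj
    have h2 : PySem.List.pyGet? canvas[k].toList (m : Int) = some canvas[k].toList[m] := by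
      simp
    rw [h2] at hc
    exact ⟨k, hk, m, ⟨hm, by simpa using hc⟩, rfl, rfl⟩

-- membership in the one-step dilation ↔ one of the four neighbors is in the source set
theorem mem_supported_iff (black : PySem.Set (Int × Int)) (i j : Int) :
    ((i, j) ∈ supportedOf black) ↔
      ((i, j + 1) ∈ black ∨ (i, j - 1) ∈ black ∨ (i + 1, j) ∈ black ∨ (i - 1, j) ∈ black) := by
  unfold supportedOf
  simp only [PySem.Set.mem_ofList, List.mem_flatMap, List.mem_cons, List.not_mem_nil, or_false]
  constructor
  · rintro ⟨⟨a, b⟩, hm, h⟩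
    rcases h with h | h | h | h <;> (simp only [Prod.mk.injEq] at h; obtain ⟨h1, h2⟩ := h)
    · exact Or.inl (by have e : (i, j + 1) = (a, b) := by rw [Prod.mk.injEq]; omega
                       exact e ▸ hm)
    · exact Or.inr (Or.inl (by have e : (i, j - 1) = (a, b) := by rw [Prod.mk.injEq]; omega
                               exact e ▸ hm))
    · exact Or.inr (Or.inr (Or.inl (by have e : (i + 1, j) = (a, b) := by rw [Prod.mk.injEq]; omega
                                       exact e ▸ hm)))
    · exact Or.inr (Or.inr (Or.inr (by have e : (i - 1, j) = (a, b) := by rw [Prod.mk.injEq]; omega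
                                       exact e ▸ hm)))
  · rintro (h | h | h | h)
    · exact ⟨(i, j + 1), h, by simp⟩
    · exact ⟨(i, j - 1), h, by simp⟩
    · exact ⟨(i + 1, j), h, by simp⟩
    · exact ⟨(i - 1, j), h, by simp⟩

-- membership in the candidate-cell set ↔ coordinates inside the H × W rectangle
theorem mem_cells_iff (canvas : List String) (i j : Int) :
    ((i, j) ∈ cellsOf canvas) ↔
      ∃ a < canvas.length, ∃ b < ((PySem.List.pyGet? canvas 0).getD "").toList.length,
        i = (a : Int) ∧ j = (b : Int) := by
  unfold cellsOf
  rw [PySem.Set.mem_ofList, List.mem_flatMap]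
  constructor
  · rintro ⟨a, ha, hx⟩
    rw [List.mem_map] at hx
    obtain ⟨b, hb, he⟩ := hx
    rw [List.mem_range] at ha hb
    obtain ⟨h1, h2⟩ := Prod.mk.inj he.symm
    exact ⟨a, ha, b, hb, h1, h2⟩
  · rintro ⟨a, ha, b, hb, rfl, rfl⟩
    exact ⟨a, List.mem_range.2 ha, List.mem_map.2 ⟨b, List.mem_range.2 hb, rfl⟩⟩

-- the two loops fire on exactly the same canvases
theorem main_iff (canvas : List String) :
    ((List.range canvas.length).flatMap (fun i =>
        (List.range (((PySem.List.pyGet? canvas 0).getD "").toList.length)).map (fun j => (i, j)))).any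
      (fun p =>
        isSpaceA canvas (p.1 : Int) ((p.2 : Int) - 1) &&
        isSpaceA canvas (p.1 : Int) ((p.2 : Int) + 1) &&
        isSpaceA canvas ((p.1 : Int) - 1) (p.2 : Int) &&
        isSpaceA canvas ((p.1 : Int) + 1) (p.2 : Int) &&
        !isSpaceA canvas (p.1 : Int) (p.2 : Int)) =
    !(PySem.Set.inter (PySem.Set.diff (blackOf canvas) (supportedOf (blackOf canvas)))
        (cellsOf canvas)).isEmpty := by
  rw [Bool.eq_iff_iff]
  simp only [List.any_eq_true, List.mem_flatMap, List.mem_range, List.mem_map,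
    Bool.and_eq_true, Bool.not_eq_true']
  rw [List.isEmpty_eq_false_iff_exists_mem]
  constructor
  · rintro ⟨x, ⟨a, ha, b, hb, rfl⟩, hc⟩
    dsimp only at hc
    obtain ⟨⟨⟨⟨h1, h2⟩, h3⟩, h4⟩, h5⟩ := hc
    refine ⟨((a : Int), (b : Int)), (PySem.Set.mem_inter _ _ _).2
      ⟨(PySem.Set.mem_diff _ _ _).2 ⟨(mem_black_iff canvas a b).2 h5, ?_⟩,
       (mem_cells_iff canvas a b).2 ⟨a, ha, b, hb, rfl, rfl⟩⟩⟩
    rw [mem_supported_iff]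
    rintro (hm | hm | hm | hm)
    · exact absurd ((mem_black_iff ..).1 hm) (by simp [h2])
    · exact absurd ((mem_black_iff ..).1 hm) (by simp [h1])
    · exact absurd ((mem_black_iff ..).1 hm) (by simp [h4])
    · exact absurd ((mem_black_iff ..).1 hm) (by simp [h3])
  · rintro ⟨⟨i, j⟩, hmem⟩
    obtain ⟨hd, hcell⟩ := (PySem.Set.mem_inter _ _ _).1 hmem
    obtain ⟨hb, hns⟩ := (PySem.Set.mem_diff _ _ _).1 hd
    obtain ⟨a, ha, b, hb', rfl, rfl⟩ := (mem_cells_iff canvas i j).1 hcell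
    have hbl := (mem_black_iff canvas a b).1 hb
    rw [mem_supported_iff] at hns
    simp only [not_or] at hns
    obtain ⟨n1, n2, n3, n4⟩ := hns
    refine ⟨(a, b), ⟨a, ha, b, hb', rfl⟩, ?_⟩
    dsimp only
    refine ⟨⟨⟨⟨?_, ?_⟩, ?_⟩, ?_⟩, hbl⟩ <;>
      · by_contra hx
        simp only [Bool.not_eq_true] at hx
        first
        | exact n2 ((mem_black_iff ..).2 hx)
        | exact n1 ((mem_black_iff ..).2 hx)
        | exact n4 ((mem_black_iff ..).2 hx)
        | exact n3 ((mem_black_iff ..).2 hx)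

-- ===== VERDICT (by name: the statement is the Claim_ definition above) =====
theorem isPaintableCanvasBySquare_spec : Claim_equal_isPaintableCanvasBySquare := by
  intro canvas _ _
  unfold Spec_isPaintableCanvasBySquare isPaintableCanvasBySquare isPaintableCanvasBySquare_alt
  simp only [main_iff canvas]
  by_cases h : (PySem.Set.diff (blackOf canvas) (supportedOf (blackOf canvas))).isEmpty
  · rw [if_pos h]
    rw [List.isEmpty_iff.1 h]
    simp [PySem.Set.inter]
  · rw [if_neg h]

theorem isPaintableCanvasBySquare_raises : Claim_raises_isPaintableCanvasBySquare := by
  unfold Claim_raises_isPaintableCanvasBySquare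
  exact ⟨by intro c _ hr hp; exact hp hr, by decide⟩

-- self-check: the raise witness really lies in the raise region
theorem isPaintableCanvasBySquare_raises_ok :
    Raises_isPaintableCanvasBySquare pvRaiseWitness_isPaintableCanvasBySquare := by
  have h := isPaintableCanvasBySquare_raises
  unfold Claim_raises_isPaintableCanvasBySquare at h
  exact h.2.2.1
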